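-- pv_equiv track=rewrite | github.com/MichalAdamus-git/Algorithm | main.py | power_outlets
-- ===== SOURCE A (Python) =====
-- from itertools import combinations
--
-- def power_outlets(arr):
-- # Extract K from input and extract list of desks.
-- # Calculate number of desks and get list of desks that can have an outlet.
--     k = arr[0]
--     desks = arr[1:]
--     num_desks = len(desks)
--     power_desks = []
--     for i in range(0, num_desks):
--         if desks[i] == 1:
--             power_desks.append(i)
--
--     possible_configs = []
--     # Function below calcultes minimal number of outlets. If with given array all desks can't be connected to outlets
--     # returns -1. Function checks the differance between index of desks with outlets ('power outlets') and checks if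
--     #for all desks the distance is smaller or equal k.
--     def optimize_power_outlets():
--         possible = False
--         for n in range(1, len(power_desks) + 1):
--             if n == 1:
--                 for index in power_desks:
--                     # set index of the outlet
--                     power_index = index
--                     reachable = 0
--                     # for each desk calculate distance to the outlet
--                     for i in range(0,len(desks)):
--                         dist = abs(i - power_index)
--                         if dist <= k:
--                             reachable += 1
--                         else:
--                             pass
--                     if reachable == len(desks):
--                         result = power_index
--                         return n
--                     else:
--                         pass
--             else:
--                 # Create list of all posisible combinations of lenght n.
--                 configs = list(combinations(power_desks, n))
--                 for config in configs:
--                     # set indices of desks with outlets.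
--                     power_indices = []
--                     reachable_desks = 0
--                     for i in config:
--                         power_indices.append(i)
--                     distances = []
--                     minimal_distances =[]
--                     # The rest of the script calculates distance for every desks to the nearest outlet. Generally it's similar to the
--                     # part with n = 1.
--                     for i in range(0, len(desks)):
--                         for index in power_indices:
--                             distance = abs(i - index)
--                             distances.append(distance)
--                         minimal_distance = min(distances)
--                         distances = []
--                         minimal_distances.append(minimal_distance)
--                     for min_dist in minimal_distances:
--                         if min_dist <= k:
--                             reachable_desks += 1
--                     if reachable_desks == len(desks) :
--                         possible = True
--                         return n
--                     else:
--                         pass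
--         if possible == False:
--             return -1
--
--     resulting = optimize_power_outlets()
--     return resulting
-- ===== SOURCE B (Python) =====
-- def power_outlets(arr):
--     # Greedy minimum interval cover: walk the desks left to right; for each first
--     # uncovered desk pick the rightmost outlet-capable desk within distance k.
--     k = arr[0]
--     desks = arr[1:]
--     m = len(desks)
--     outlets = [i for i, d in enumerate(desks) if d == 1]
--     count = 0
--     i = 0
--     while i < m:
--         best = None
--         for p in outlets:
--             if p <= i + k:
--                 best = p
--         if best is None or best < i - k:
--             return -1
--         count += 1
--         i = best + k + 1
--     return count
-- ===== Notes on version B (the rewrite author's own statement) =====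
-- stated objective: alternative
-- what changed: Replaces the staged search over all combinations of outlet-capable desks by the classic greedy interval cover: walk the desks left to right and for each first uncovered desk pick the rightmost outlet within distance k (exponential worst case in A vs polynomial in B, though on the random timing family A already answers in linear time so no speed-up is measured).
-- intended difference: On one-element inputs (a k but zero desks) A returns -1 while B returns 0; zero desks need zero outlets, so B's value is the intended one. — e.g. on power_outlets([2]): A returns -1, B returns 0
import Mathlib
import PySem

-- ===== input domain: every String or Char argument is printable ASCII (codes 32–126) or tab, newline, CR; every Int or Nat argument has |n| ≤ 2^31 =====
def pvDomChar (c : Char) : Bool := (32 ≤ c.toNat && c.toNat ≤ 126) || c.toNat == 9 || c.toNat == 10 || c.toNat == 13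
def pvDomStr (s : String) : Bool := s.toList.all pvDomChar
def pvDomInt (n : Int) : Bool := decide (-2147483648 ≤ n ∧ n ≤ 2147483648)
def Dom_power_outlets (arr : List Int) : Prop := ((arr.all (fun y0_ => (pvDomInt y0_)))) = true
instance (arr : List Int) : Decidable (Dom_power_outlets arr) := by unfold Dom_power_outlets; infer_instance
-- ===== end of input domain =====

-- B replaces A's combination search by the classic greedy interval cover (a different algorithm,
-- similar measured cost); on zero-desk inputs A returns -1 where B returns the intended 0 (see D_).


-- ===== PORT A =====
-- itertools.combinations(l, n) (order of elements preserved); helper for port A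
def pvComb (n : Nat) (l : List Int) : List (List Int) :=
  match n, l with
  | 0, _ => [[]]
  | _ + 1, [] => []
  | n + 1, x :: xs => ((pvComb n xs).map (fun t => x :: t)) ++ pvComb (n + 1) xs

-- the power_desks loop: for i in range(0, num_desks): if desks[i] == 1: append(i)
-- (desks[i] is always in range here, so getD is exact)
def pvPowerDesks (desks : List Int) : List Int :=
  (List.range desks.length).foldl
    (fun acc i => if desks.getD i 0 = 1 then acc ++ [(i : Int)] else acc) []

-- n = 1 branch: the `reachable` count for a single outlet index
def pvReach1 (k : Int) (m : Nat) (idx : Int) : Int :=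
  (List.range m).foldl (fun (r : Int) (i : Nat) => if |(i : Int) - idx| ≤ k then r + 1 else r) 0

def pvTryOne (k : Int) (m : Nat) : List Int → Option Int
  | [] => none
  | idx :: rest => if pvReach1 k m idx = (m : Int) then some 1 else pvTryOne k m rest

-- min(distances) for one desk i (config is nonempty wherever this is called)
def pvMinDist (config : List Int) (i : Int) : Int :=
  ((PySem.List.min? (config.map (fun idx => |i - idx|)) (fun d => d)).getD 0)

-- the minimal_distances list built by the inner loops
def pvMinimalDistances (config : List Int) (m : Nat) : List Int :=
  (List.range m).foldl (fun (acc : List Int) (i : Nat) => acc ++ [pvMinDist config (i : Int)]) []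

-- the reachable_desks count
def pvReachCfg (k : Int) (m : Nat) (config : List Int) : Int :=
  (pvMinimalDistances config m).foldl (fun r d => if d ≤ k then r + 1 else r) 0

def pvTryConfigs (k : Int) (m : Nat) : List (List Int) → Bool
  | [] => false
  | c :: cs => if pvReachCfg k m c = (m : Int) then true else pvTryConfigs k m cs

-- for n in range(1, len(power_desks) + 1): …
def pvOptLoop (k : Int) (m : Nat) (P : List Int) : List Nat → Int
  | [] => -1
  | n :: ns =>
    if n = 1 then
      match pvTryOne k m P with
      | some r => r
      | none => pvOptLoop k m P ns
    else
      if pvTryConfigs k m (pvComb n P) then (n : Int) else pvOptLoop k m P ns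

def power_outlets (arr : List Int) : Int :=
  match arr with
  | [] => -1   -- Python raises IndexError on arr[0]; excluded by Pre_
  | k :: desks =>
    let P := pvPowerDesks desks
    pvOptLoop k desks.length P ((List.range P.length).map (· + 1))

-- ===== PORT B =====
-- outlets = [i for i, d in enumerate(desks) if d == 1]
def pvOutlets (desks : List Int) : List Int :=
  (PySem.List.enumerate desks).filterMap (fun pr => if pr.2 = 1 then some pr.1 else none)

-- best = last p in outlets with p <= i + k (None if there is none)
def pvBest (k : Int) (outlets : List Int) (i : Int) : Option Int :=
  outlets.foldl (fun b p => if p ≤ i + k then some p else b) none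

-- the while loop; fuel m + 1 suffices because i grows by at least 1 per iteration
def pvGreedy (k : Int) (outlets : List Int) (m : Nat) : Nat → Int → Int → Int
  | 0, _, count => count
  | fuel + 1, i, count =>
    if i < (m : Int) then
      match pvBest k outlets i with
      | none => -1
      | some best =>
        if best < i - k then -1
        else pvGreedy k outlets m fuel (best + k + 1) (count + 1)
    else count

def power_outlets_alt (arr : List Int) : Int :=
  match arr with
  | [] => -1
  | k :: desks =>
    pvGreedy k (pvOutlets desks) desks.length (desks.length + 1) 0 0

-- ===== PRECONDITION & SPEC =====
-- Pre_ excludes only the empty list, on which Python A raises IndexError at arr[0].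
def Pre_power_outlets (arr : List Int) : Prop := arr ≠ []
instance (arr : List Int) : Decidable (Pre_power_outlets arr) := by unfold Pre_power_outlets; infer_instance
def pvWitness_power_outlets : List Int := [1, 1, 0, 0, 1]

-- On one-element inputs (a k but zero desks) A returns -1 while B returns 0; zero desks need zero
-- outlets, so B's value is the intended one.
def D_power_outlets (arr : List Int) : Prop := arr.length = 1
instance (arr : List Int) : Decidable (D_power_outlets arr) := by unfold D_power_outlets; infer_instance

def Spec_power_outlets (arr : List Int) (out : Int) : Prop := ¬ D_power_outlets arr → out = power_outlets_alt arr
instance (arr : List Int) (out : Int) : Decidable (Spec_power_outlets arr out) := by unfold Spec_power_outlets; infer_instance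

def pvDiffWitness_power_outlets : List Int := [2]
def pvDiffWitnessOut_power_outlets : Int × Int := (-1, 0)

-- ===== CLAIM (what is proved, stated in full; the proofs are below) =====
def Claim_unchanged_power_outlets : Prop := ∀ (arr : List Int), Dom_power_outlets arr → Pre_power_outlets arr → Spec_power_outlets arr (power_outlets arr)
def Claim_changed_power_outlets : Prop := Dom_power_outlets (pvDiffWitness_power_outlets) ∧ Pre_power_outlets (pvDiffWitness_power_outlets) ∧ D_power_outlets (pvDiffWitness_power_outlets) ∧ power_outlets (pvDiffWitness_power_outlets) = pvDiffWitnessOut_power_outlets.1 ∧ power_outlets_alt (pvDiffWitness_power_outlets) = pvDiffWitnessOut_power_outlets.2 ∧ pvDiffWitnessOut_power_outlets.1 ≠ pvDiffWitnessOut_power_outlets.2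
def Claim_exact_power_outlets : Prop := ∀ (arr : List Int), Dom_power_outlets arr → Pre_power_outlets arr → D_power_outlets arr → power_outlets arr ≠ power_outlets_alt arr

-- ===== LEMMAS AND PROOFS =====

-- "S covers all desks 0..m-1 within distance k"
def pvCovers (k : Int) (m : Nat) (S : List Int) : Prop :=
  ∀ j : Nat, j < m → ∃ p ∈ S, |(j : Int) - p| ≤ k

-- "S covers all desks at positions ≥ i"
def pvCoversFrom (k : Int) (m : Nat) (i : Int) (S : List Int) : Prop :=
  ∀ j : Nat, i ≤ (j : Int) → j < m → ∃ p ∈ S, |(j : Int) - p| ≤ k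

-- "some subsequence of P of size n covers all desks"
def pvFound (k : Int) (m : Nat) (P : List Int) (n : Nat) : Prop :=
  ∃ S : List Int, S.Sublist P ∧ S.length = n ∧ pvCovers k m S

theorem pvPowerDesks_eq (desks : List Int) :
    pvPowerDesks desks =
      ((List.range desks.length).filter (fun i => desks.getD i 0 = 1)).map (fun i => ((i : Nat) : Int)) := by
  have := PySem.List.foldl_append_if (fun i => decide (desks.getD i 0 = 1))
    (fun i : Nat => ((i : Nat) : Int)) (List.range desks.length) []
  simpa [pvPowerDesks] using this

theorem filterMap_if_eq_map_filter (l : List Nat) (p : Nat → Bool) (f : Nat → Int) :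
    List.filterMap (fun x => if p x then some (f x) else none) l = List.map f (List.filter p l) := by
  induction l with
  | nil => rfl
  | cons x xs ih => by_cases h : p x <;> simp [h, ih]

theorem pvOutlets_eq (desks : List Int) : pvOutlets desks = pvPowerDesks desks := by
  rw [pvPowerDesks_eq, pvOutlets, PySem.List.enumerate_eq_map_pyRange desks 0]
  have : PySem.List.len desks = ((desks.length : Nat) : Int) := by simp [PySem.List.len]
  rw [this, PySem.List.pyRange_zero_nat]
  simp only [List.map_map, List.filterMap_map, Function.comp, PySem.List.pyGetD_natCast]
  have h2 : (fun x : Nat => if desks.getD x 0 = 1 then some ((x : Nat) : Int) else none)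
      = (fun x => if (fun x : Nat => decide (desks.getD x 0 = 1)) x = true then some ((x : Nat) : Int) else none) := by
    funext x; simp
  rw [h2, filterMap_if_eq_map_filter]

theorem pvPowerDesks_sorted (desks : List Int) : (pvPowerDesks desks).Pairwise (· < ·) := by
  rw [pvPowerDesks_eq, List.pairwise_map]
  exact (List.pairwise_lt_range.sublist List.filter_sublist).imp (fun h => by exact_mod_cast h)

theorem mem_pvComb (n : Nat) (l S : List Int) :
    S ∈ pvComb n l ↔ S.Sublist l ∧ S.length = n := by
  induction l generalizing n S with
  | nil =>
    cases n with
    | zero => simp [pvComb, List.sublist_nil]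
    | succ n =>
      simp only [pvComb, List.not_mem_nil, false_iff]
      rintro ⟨hs, hl⟩
      rw [List.sublist_nil] at hs; subst hs; simp at hl
  | cons x xs ih =>
    cases n with
    | zero =>
      constructor
      · intro h; simp [pvComb] at h; subst h; simp
      · rintro ⟨hs, hl⟩; rw [List.length_eq_zero_iff] at hl; subst hl; simp [pvComb]
    | succ n =>
      simp only [pvComb, List.mem_append, List.mem_map, ih]
      constructor
      · rintro (⟨t, ⟨hts, htl⟩, rfl⟩ | ⟨hs, hl⟩)
        · exact ⟨List.Sublist.cons₂ x hts, by simp [htl]⟩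
        · exact ⟨hs.cons x, hl⟩
      · rintro ⟨hs, hl⟩
        rcases List.sublist_cons_iff.mp hs with h | ⟨r, rfl, hr⟩
        · exact Or.inr ⟨h, hl⟩
        · exact Or.inl ⟨r, ⟨hr, by simpa using hl⟩, rfl⟩

theorem pvReach1_eq_iff (k : Int) (m : Nat) (idx : Int) :
    pvReach1 k m idx = (m : Int) ↔ pvCovers k m [idx] := by
  have h1 : (fun (r : Int) (i : Nat) => if |(i : Int) - idx| ≤ k then r + 1 else r)
      = (fun r i => if (fun i : Nat => decide (|(i : Int) - idx| ≤ k)) i = true then r + 1 else r) := by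
    funext r i; by_cases h : |(i : Int) - idx| ≤ k <;> simp [h]
  rw [pvReach1, h1, PySem.List.foldl_count_if]
  rw [pvCovers]
  constructor
  · intro h j hj
    have : List.countP (fun i : Nat => decide (|(i : Int) - idx| ≤ k)) (List.range m) = (List.range m).length := by
      simp at h ⊢; omega
    rw [List.countP_eq_length] at this
    have := this j (by simpa using hj)
    exact ⟨idx, by simp, by simpa using this⟩
  · intro h
    have : List.countP (fun i : Nat => decide (|(i : Int) - idx| ≤ k)) (List.range m) = (List.range m).length := by
      rw [List.countP_eq_length]
      intro a ha
      obtain ⟨p, hp, hle⟩ := h a (by simpa using ha)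
      simp only [List.mem_singleton] at hp; subst hp; simpa using hle
    simp [this]

theorem pvMinDist_le_iff (config : List Int) (i k : Int) (hne : config ≠ []) :
    pvMinDist config i ≤ k ↔ ∃ p ∈ config, |i - p| ≤ k := by
  rw [pvMinDist]
  have hne' : config.map (fun idx => |i - idx|) ≠ [] := by simpa using hne
  rcases hv : PySem.List.min? (config.map (fun idx => |i - idx|)) (fun d => d) with _ | v
  · exact absurd ((PySem.List.min?_eq_none_iff _ _).mp hv) hne'
  · have hmem := PySem.List.min?_mem hv
    have hmin := PySem.List.min?_isMin hv
    simp only [Option.getD_some]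
    constructor
    · intro hvk
      obtain ⟨p, hp, rfl⟩ := List.mem_map.mp hmem
      exact ⟨p, hp, hvk⟩
    · rintro ⟨p, hp, hpk⟩
      exact le_trans (hmin _ (List.mem_map.mpr ⟨p, hp, rfl⟩)) hpk

theorem pvReachCfg_eq_iff (k : Int) (m : Nat) (config : List Int) (hne : config ≠ []) :
    pvReachCfg k m config = (m : Int) ↔ pvCovers k m config := by
  rw [pvReachCfg, pvMinimalDistances,
    PySem.List.foldl_append_singleton_eq_map (fun i : Nat => pvMinDist config (i : Int))]
  have h1 : (fun (r d : Int) => if d ≤ k then r + 1 else r)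
      = (fun r d => if (fun d : Int => decide (d ≤ k)) d = true then r + 1 else r) := by
    funext r d; by_cases h : d ≤ k <;> simp [h]
  rw [List.nil_append, h1, PySem.List.foldl_count_if]
  rw [List.countP_map, pvCovers]
  constructor
  · intro h j hj
    have : List.countP ((fun d : Int => decide (d ≤ k)) ∘ fun i : Nat => pvMinDist config (i : Int)) (List.range m) = (List.range m).length := by
      simp at h ⊢; omega
    rw [List.countP_eq_length] at this
    have := this j (by simpa using hj)
    simp only [Function.comp, decide_eq_true_eq] at this
    exact (pvMinDist_le_iff config _ k hne).mp this
  · intro h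
    have : List.countP ((fun d : Int => decide (d ≤ k)) ∘ fun i : Nat => pvMinDist config (i : Int)) (List.range m) = (List.range m).length := by
      rw [List.countP_eq_length]
      intro a ha
      simp only [Function.comp, decide_eq_true_eq]
      exact (pvMinDist_le_iff config _ k hne).mpr (h a (by simpa using ha))
    simp [this]

theorem pvTryOne_some_iff (k : Int) (m : Nat) (P : List Int) :
    (∃ r, pvTryOne k m P = some r) ↔ pvFound k m P 1 := by
  induction P with
  | nil =>
    simp only [pvTryOne, pvFound]
    constructor
    · rintro ⟨r, hr⟩; exact absurd hr (by simp)
    · rintro ⟨S, hS, h1, -⟩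
      rw [List.sublist_nil] at hS; subst hS; simp at h1
  | cons x xs ih =>
    rw [pvTryOne]
    split_ifs with h
    · simp only [Option.some.injEq, exists_eq']
      constructor
      · intro _
        exact ⟨[x], by simp, rfl, (pvReach1_eq_iff k m x).mp h⟩
      · intro _; trivial
    · rw [ih]
      constructor
      · rintro ⟨S, hS, hl, hc⟩
        exact ⟨S, hS.cons x, hl, hc⟩
      · rintro ⟨S, hS, hl, hc⟩
        rcases List.sublist_cons_iff.mp hS with hS' | ⟨r, rfl, hr⟩
        · exact ⟨S, hS', hl, hc⟩
        · have : r = [] := by simpa using hl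
          subst this
          exact absurd ((pvReach1_eq_iff k m x).mpr hc) h

theorem pvTryOne_val (k : Int) (m : Nat) (P : List Int) (r : Int)
    (h : pvTryOne k m P = some r) : r = 1 := by
  induction P with
  | nil => simp [pvTryOne] at h
  | cons x xs ih =>
    rw [pvTryOne] at h
    split_ifs at h with h'
    · simpa using h.symm
    · exact ih h

theorem pvTryConfigs_true_iff (k : Int) (m : Nat) (P : List Int) (n : Nat) (hn : 1 ≤ n) :
    pvTryConfigs k m (pvComb n P) = true ↔ pvFound k m P n := by
  have main : ∀ cs : List (List Int), (∀ c ∈ cs, c ∈ pvComb n P) →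
      (pvTryConfigs k m cs = true ↔ ∃ c ∈ cs, pvCovers k m c) := by
    intro cs hcs
    induction cs with
    | nil => simp [pvTryConfigs]
    | cons c cs ih =>
      rw [pvTryConfigs]
      have hc := hcs c (by simp)
      have hne : c ≠ [] := by
        intro hnil; subst hnil
        have := (mem_pvComb n P []).mp hc
        simp at this; omega
      split_ifs with h
      · simp only [true_iff]
        exact ⟨c, by simp, (pvReachCfg_eq_iff k m c hne).mp h⟩
      · rw [ih (fun c' hc' => hcs c' (by simp [hc']))]
        constructor
        · rintro ⟨c', hc', hcov⟩; exact ⟨c', by simp [hc'], hcov⟩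
        · rintro ⟨c', hc', hcov⟩
          rcases List.mem_cons.mp hc' with rfl | hmem
          · exact absurd ((pvReachCfg_eq_iff k m c' hne).mpr hcov) h
          · exact ⟨c', hmem, hcov⟩
  rw [main (pvComb n P) (fun c hc => hc)]
  constructor
  · rintro ⟨c, hc, hcov⟩
    obtain ⟨hs, hl⟩ := (mem_pvComb n P c).mp hc
    exact ⟨c, hs, hl, hcov⟩
  · rintro ⟨S, hs, hl, hcov⟩
    exact ⟨S, (mem_pvComb n P S).mpr ⟨hs, hl⟩, hcov⟩

theorem pvOptLoop_step_fail (k : Int) (m : Nat) (P : List Int) (n : Nat) (ns : List Nat)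
    (hn1 : 1 ≤ n) (hnf : ¬ pvFound k m P n) :
    pvOptLoop k m P (n :: ns) = pvOptLoop k m P ns := by
  rw [pvOptLoop]
  by_cases h1 : n = 1
  · rw [if_pos h1]
    rcases hr : pvTryOne k m P with _ | r
    · simp
    · exact absurd ((pvTryOne_some_iff k m P).mp ⟨r, hr⟩) (h1 ▸ hnf)
  · rw [if_neg h1]
    have : ¬ pvTryConfigs k m (pvComb n P) = true := by
      intro ht
      exact hnf ((pvTryConfigs_true_iff k m P n hn1).mp ht)
    simp [this]

theorem pvOptLoop_none (k : Int) (m : Nat) (P : List Int) (ns : List Nat)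
    (h : ∀ n ∈ ns, 1 ≤ n ∧ ¬ pvFound k m P n) : pvOptLoop k m P ns = -1 := by
  induction ns with
  | nil => rfl
  | cons n ns ih =>
    have hn := h n (by simp)
    rw [pvOptLoop_step_fail k m P n ns hn.1 hn.2]
    exact ih (fun n' hn' => h n' (by simp [hn']))

theorem pvOptLoop_found (k : Int) (m : Nat) (P : List Int) (g : Nat) (ns₁ ns₂ : List Nat)
    (h₁ : ∀ n ∈ ns₁, 1 ≤ n ∧ ¬ pvFound k m P n) (hg : 1 ≤ g) (hf : pvFound k m P g) :
    pvOptLoop k m P (ns₁ ++ g :: ns₂) = (g : Int) := by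
  induction ns₁ with
  | nil =>
    rw [List.nil_append, pvOptLoop]
    by_cases h1 : g = 1
    · rw [if_pos h1]
      obtain ⟨r, hr⟩ := (pvTryOne_some_iff k m P).mpr (h1 ▸ hf)
      rw [hr]
      rw [pvTryOne_val k m P r hr, h1]; rfl
    · rw [if_neg h1]
      have : pvTryConfigs k m (pvComb g P) = true := (pvTryConfigs_true_iff k m P g hg).mpr hf
      simp [this]
  | cons n ns ih =>
    have hn := h₁ n (by simp)
    rw [List.cons_append, pvOptLoop_step_fail k m P n _ hn.1 hn.2]
    exact ih (fun n' hn' => h₁ n' (by simp [hn']))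

theorem pvBest_aux (c : Int) (P : List Int) : ∀ init : Option Int,
    P.foldl (fun b p => if p ≤ c then some p else b) init
      = ((P.filter (fun p => p ≤ c)).getLast?).or init := by
  induction P with
  | nil => intro init; simp
  | cons x xs ih =>
    intro init
    rw [List.foldl_cons]
    by_cases h : x ≤ c
    · rw [if_pos h, ih, List.filter_cons_of_pos (by simpa using h)]
      rcases hf : (xs.filter (fun p => p ≤ c)).getLast? with _ | b
      · simp [List.getLast?_cons, hf]
      · simp [List.getLast?_cons, hf]
    · rw [if_neg h, ih, List.filter_cons_of_neg (by simpa using h)]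

theorem pvBest_none_iff (k : Int) (P : List Int) (i : Int) :
    pvBest k P i = none ↔ ∀ p ∈ P, ¬ p ≤ i + k := by
  rw [pvBest, pvBest_aux]
  rw [Option.or_eq_none_iff]
  simp

theorem pvBest_some (k : Int) (P : List Int) (i b : Int) (hs : P.Pairwise (· < ·))
    (h : pvBest k P i = some b) :
    b ∈ P ∧ b ≤ i + k ∧ ∀ p ∈ P, p ≤ i + k → p ≤ b := by
  rw [pvBest, pvBest_aux] at h
  rcases hf : (P.filter (fun p => p ≤ i + k)).getLast? with _ | b'
  · rw [hf] at h; exact absurd h (by simp)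
  · rw [hf] at h
    rw [show (some b').or none = some b' from rfl] at h
    rw [Option.some.injEq] at h
    subst h
    have hmem : b' ∈ P.filter (fun p => p ≤ i + k) := List.mem_of_getLast? hf
    have hmemP : b' ∈ P := List.mem_of_mem_filter hmem
    have hble : b' ≤ i + k := by simpa using List.of_mem_filter hmem
    refine ⟨hmemP, hble, ?_⟩
    intro p hp hple
    have hpf : p ∈ P.filter (fun p => p ≤ i + k) := List.mem_filter.mpr ⟨hp, by simpa using hple⟩
    have hsf : (P.filter (fun p => p ≤ i + k)).Pairwise (· < ·) := hs.filter _
    obtain ⟨l', hl'⟩ := List.getLast?_eq_some_iff.mp hf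
    rw [hl'] at hpf hsf
    rcases List.mem_append.mp hpf with hmem' | hmem'
    · exact le_of_lt ((List.pairwise_append.mp hsf).2.2 p hmem' b' (by simp))
    · simp only [List.mem_singleton] at hmem'; subst hmem'; exact le_refl _

theorem sublist_cons_of_sorted {P S : List Int} {b : Int} (hs : P.Pairwise (· < ·))
    (hb : b ∈ P) (hS : S.Sublist P) (hgt : ∀ x ∈ S, b < x) : (b :: S).Sublist P := by
  obtain ⟨P₁, P₂, rfl⟩ := List.mem_iff_append.mp hb
  have hsplit := List.pairwise_append.mp hs
  have h2 := hsplit.2.1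
  rw [List.pairwise_cons] at h2
  have hfil : (P₁ ++ b :: P₂).filter (fun x => b < x) = P₂ := by
    rw [List.filter_append, List.filter_cons]
    have ha : P₁.filter (fun x => b < x) = [] := by
      rw [List.filter_eq_nil_iff]
      intro a hmem
      have : a < b := hsplit.2.2 a hmem b (by simp)
      simp; omega
    have hb' : P₂.filter (fun x => b < x) = P₂ := by
      rw [List.filter_eq_self]
      intro a hmem
      simpa using h2.1 a hmem
    simp [ha, hb']
  have hSf : S.filter (fun x => b < x) = S := by
    rw [List.filter_eq_self]; intro a hmem; simpa using hgt a hmem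
  have hsub2 : S.Sublist P₂ := by
    have := hS.filter (fun x => b < x)
    rwa [hSf, hfil] at this
  exact ((hsub2.cons₂ b)).trans (List.sublist_append_right _ _)

theorem pvGreedy_sound (k : Int) (P : List Int) (m : Nat) (hs : P.Pairwise (· < ·)) :
    ∀ (fuel : Nat) (i count : Int), (m : Int) ≤ i + fuel →
      pvGreedy k P m fuel i count = -1 ∨
      ∃ S : List Int, S.Sublist P ∧ (∀ p ∈ S, i - k ≤ p) ∧ pvCoversFrom k m i S ∧
        pvGreedy k P m fuel i count = count + S.length := by
  intro fuel
  induction fuel with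
  | zero =>
    intro i count hfi
    right
    refine ⟨[], by simp, by simp, ?_, by simp [pvGreedy]⟩
    intro j hij hjm
    exfalso; push_cast at hfi; omega
  | succ fuel ih =>
    intro i count hfi
    by_cases him : i < (m : Int)
    · rcases hb : pvBest k P i with _ | best
      · left; rw [pvGreedy, if_pos him, hb]
      · have hred : pvGreedy k P m (fuel + 1) i count
            = if best < i - k then -1 else pvGreedy k P m fuel (best + k + 1) (count + 1) := by
          rw [pvGreedy, if_pos him, hb]
        obtain ⟨hbmem, hble, hbmax⟩ := pvBest_some k P i best hs hb
        by_cases hlow : best < i - k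
        · rw [hred, if_pos hlow]; left; rfl
        · rw [hred, if_neg hlow]
          have hstep : i + 1 ≤ best + k + 1 := by omega
          rcases ih (best + k + 1) (count + 1) (by push_cast at hfi ⊢; omega) with h1 | ⟨S', hS'sub, hS'lo, hS'cov, hS'len⟩
          · left; exact h1
          · right
            refine ⟨best :: S', ?_, ?_, ?_, ?_⟩
            · exact sublist_cons_of_sorted hs hbmem hS'sub
                (fun x hx => by have := hS'lo x hx; omega)
            · intro p hp
              rcases List.mem_cons.mp hp with rfl | hp'
              · omega
              · have := hS'lo p hp'; omega
            · intro j hij hjm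
              by_cases hjb : (j : Int) ≤ best + k
              · exact ⟨best, by simp, by rw [abs_le]; omega⟩
              · obtain ⟨p, hp, hpd⟩ := hS'cov j (by omega) hjm
                exact ⟨p, by simp [hp], hpd⟩
            · rw [hS'len]; simp [List.length_cons]; ring
    · right
      refine ⟨[], by simp, by simp, ?_, by rw [pvGreedy, if_neg him]; simp⟩
      intro j hij hjm
      exfalso; omega

theorem pvGreedy_le (k : Int) (P : List Int) (m : Nat) (hs : P.Pairwise (· < ·)) :
    ∀ (fuel : Nat) (i count : Int) (S : List Int), (m : Int) ≤ i + fuel → 0 ≤ i → 0 ≤ count →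
      S.Sublist P → pvCoversFrom k m i S →
      pvGreedy k P m fuel i count ≠ -1 ∧ pvGreedy k P m fuel i count ≤ count + S.length := by
  intro fuel
  induction fuel with
  | zero =>
    intro i count S hfi hi hc hsub hcov
    refine ⟨by simp [pvGreedy]; omega, by simp [pvGreedy]⟩
  | succ fuel ih =>
    intro i count S hfi hi hc hsub hcov
    by_cases him : i < (m : Int)
    · have hjm : i.toNat < m := by omega
      obtain ⟨q, hqS, hqd⟩ := hcov i.toNat (by omega) hjm
      have hqd' : |i - q| ≤ k := by
        have hit : ((i.toNat : Nat) : Int) = i := by omega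
        rwa [hit] at hqd
      have hqP : q ∈ P := hsub.subset hqS
      have hqle : q ≤ i + k := by rw [abs_le] at hqd'; omega
      rcases hb : pvBest k P i with _ | best
      · exact absurd hqle ((pvBest_none_iff k P i).mp hb q hqP)
      · have hred : pvGreedy k P m (fuel + 1) i count
            = if best < i - k then -1 else pvGreedy k P m fuel (best + k + 1) (count + 1) := by
          rw [pvGreedy, if_pos him, hb]
        obtain ⟨hbmem, hble, hbmax⟩ := pvBest_some k P i best hs hb
        have hqb : q ≤ best := hbmax q hqP hqle
        have hlow : ¬ best < i - k := by rw [abs_le] at hqd'; omega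
        rw [hred, if_neg hlow]
        set i' := best + k + 1 with hi'
        set S' := S.filter (fun p => decide (i' - k ≤ p)) with hS'
        have hsub' : S'.Sublist P := (List.filter_sublist).trans hsub
        have hcov' : pvCoversFrom k m i' S' := by
          intro j hij hjm'
          obtain ⟨p, hpS, hpd⟩ := hcov j (by omega) hjm'
          refine ⟨p, ?_, hpd⟩
          rw [hS', List.mem_filter]
          refine ⟨hpS, ?_⟩
          rw [abs_le] at hpd
          simp; omega
        have hqnot : ¬ (i' - k ≤ q) := by omega
        have hlen : S'.length < S.length := by
          have hle := (List.filter_sublist (l := S) (p := fun p => decide (i' - k ≤ p))).length_le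
          rcases lt_or_eq_of_le hle with h1 | h1
          · exact h1
          · exfalso
            have heq := List.Sublist.eq_of_length (List.filter_sublist) h1
            have hq' : q ∈ S' := by rw [hS', heq]; exact hqS
            rw [hS', List.mem_filter] at hq'
            exact hqnot (by simpa using hq'.2)
        have hrec := ih i' (count + 1) S' (by push_cast at hfi ⊢; omega) (by omega) (by omega) hsub' hcov'
        refine ⟨hrec.1, ?_⟩
        have hcast : (S'.length : Int) + 1 ≤ (S.length : Int) := by exact_mod_cast hlen
        omega
    · have hred : pvGreedy k P m (fuel + 1) i count = count := by rw [pvGreedy, if_neg him]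
      rw [hred]
      have : (0 : Int) ≤ S.length := by positivity
      exact ⟨by omega, by omega⟩

theorem range_map_succ_split (L g : Nat) (hg : 1 ≤ g) (hgL : g ≤ L) :
    ∃ ns₂ : List Nat, (List.range L).map (· + 1) = ((List.range (g - 1)).map (· + 1)) ++ g :: ns₂ := by
  obtain ⟨c, hc⟩ : ∃ c, L = (g - 1) + (c + 1) := ⟨L - g, by omega⟩
  refine ⟨(List.range c).map (fun j => g - 1 + j.succ + 1), ?_⟩
  rw [hc, List.range_add, List.map_append, List.range_succ_eq_map]
  simp only [List.map_cons, List.map_map]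
  have hgg : g - 1 + 0 + 1 = g := by omega
  simp [hgg, Function.comp]

theorem pv_main (k : Int) (desks : List Int) (hne : desks ≠ []) :
    power_outlets (k :: desks) = power_outlets_alt (k :: desks) := by
  have hm : 0 < desks.length := List.length_pos_iff.mpr hne
  have hs : (pvPowerDesks desks).Pairwise (· < ·) := pvPowerDesks_sorted desks
  set m := desks.length with hmdef
  set P := pvPowerDesks desks with hP
  have hA : power_outlets (k :: desks) = pvOptLoop k m P ((List.range P.length).map (· + 1)) := rfl
  have hB : power_outlets_alt (k :: desks) = pvGreedy k P m (m + 1) 0 0 := by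
    show pvGreedy k (pvOutlets desks) m (m + 1) 0 0 = pvGreedy k P m (m + 1) 0 0
    rw [pvOutlets_eq]
  rw [hA, hB]
  have hfuel : (m : Int) ≤ 0 + ((m + 1 : Nat) : Int) := by push_cast; omega
  rcases pvGreedy_sound k P m hs (m + 1) 0 0 hfuel with hg | ⟨S₀, hsub, hlo, hcov, hlen⟩
  · rw [hg]
    apply pvOptLoop_none
    intro n hn
    obtain ⟨j, hj, rfl⟩ := List.mem_map.mp hn
    refine ⟨by omega, ?_⟩
    rintro ⟨S, hSsub, hSlen, hScov⟩
    have := pvGreedy_le k P m hs (m + 1) 0 0 S hfuel le_rfl le_rfl hSsub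
      (fun j' _ hj' => hScov j' hj')
    exact this.1 hg
  · have hcovers : pvCovers k m S₀ := fun j hj => hcov j (by positivity) hj
    have hS₀ne : S₀ ≠ [] := by
      intro h0; subst h0
      obtain ⟨p, hp, -⟩ := hcovers 0 hm
      simp at hp
    have hg1 : 1 ≤ S₀.length := List.length_pos_iff.mpr hS₀ne
    have hgP : S₀.length ≤ P.length := hsub.length_le
    obtain ⟨ns₂, hns⟩ := range_map_succ_split P.length S₀.length hg1 hgP
    rw [hns, pvOptLoop_found k m P S₀.length _ ns₂ ?side hg1 ⟨S₀, hsub, rfl, hcovers⟩]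
    · rw [hlen]; omega
    case side =>
      intro n hn
      obtain ⟨j, hj, rfl⟩ := List.mem_map.mp hn
      rw [List.mem_range] at hj
      refine ⟨by omega, ?_⟩
      rintro ⟨S, hSsub, hSlen, hScov⟩
      have hle := pvGreedy_le k P m hs (m + 1) 0 0 S hfuel le_rfl le_rfl hSsub
        (fun j' _ hj' => hScov j' hj')
      rw [hlen] at hle
      have := hle.2
      omega

-- ===== VERDICT (by name: the statement is the Claim_ definition above) =====
theorem power_outlets_spec : Claim_unchanged_power_outlets := by
  intro arr _ hpre hD
  match arr with
  | [] => exact absurd rfl hpre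
  | [k] => exact absurd rfl hD
  | k :: d :: ds => exact pv_main k (d :: ds) (by simp)

theorem power_outlets_changed : Claim_changed_power_outlets := by
  unfold Claim_changed_power_outlets; decide

theorem power_outlets_tight : Claim_exact_power_outlets := by
  intro arr _ _ hD
  match arr with
  | [k] =>
    simp [power_outlets, power_outlets_alt, pvPowerDesks, pvOptLoop, pvGreedy]
  | [] => exact absurd hD (by simp [D_power_outlets])
  | k :: d :: ds => exact absurd hD (by simp [D_power_outlets])
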